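-- pv_equiv track=rewrite | github.com/ashillc/brsk | main.py | generate_lookup_dict
-- ===== SOURCE A (Python) =====
-- def generate_lookup_dict(word_list: list) -> dict:
--     """Generate a lookup dict for quick reference.
--        e.g.
--        {
--          "a": {
--                 "6" : ['ashill']
--               }
--         "c": {
--                 "9" : ['chiranjan']
--               }
--        }
--     """
--
--     lookup_dict = {}
--     for word in word_list:  # Loop through the words in the list
--         if not word:
--             continue  # If its a blank word, skip it
--         first_letter = word[0]  # Extract the first letter
--         word_len = str(len(word))
--
--         if first_letter not in lookup_dict:
--             lookup_dict[first_letter] = {}  # If lookup doesnt already exist, create it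
--
--         if word_len not in lookup_dict[first_letter]:
--             lookup_dict[first_letter][word_len] = [word]  # If lookup list doesnt exist, initialise it
--         else:
--             if word not in lookup_dict[first_letter][word_len]:  # Check if word is in list already
--                 lookup_dict[first_letter][word_len].append(word)  # Add it to the list
--
--     return lookup_dict
-- ===== SOURCE B (Python) =====
-- def generate_lookup_dict(word_list: list) -> dict:
--     """Generate a lookup dict for quick reference.
--
--     Two-pass rewrite: first build the nested dict with setdefault, appending
--     every non-blank word (duplicates allowed); then rebuild it with each word
--     list deduplicated via dict.fromkeys (first occurrence order preserved).
--     """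
--     lookup_dict = {}
--     for word in word_list:
--         if word:
--             lookup_dict.setdefault(word[0], {}).setdefault(str(len(word)), []).append(word)
--     return {letter: {length: list(dict.fromkeys(words))
--                      for length, words in inner.items()}
--             for letter, inner in lookup_dict.items()}
-- ===== Notes on version B (the rewrite author's own statement) =====
-- stated objective: faster
-- what changed: Replaced A's inline per-word membership scan of the bucket list by a two-pass build-then-dedup structure: a setdefault loop appends every non-blank word (duplicates allowed), then a dict comprehension rebuilds the table deduplicating each list once with hash-based dict.fromkeys.
import Mathlib
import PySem

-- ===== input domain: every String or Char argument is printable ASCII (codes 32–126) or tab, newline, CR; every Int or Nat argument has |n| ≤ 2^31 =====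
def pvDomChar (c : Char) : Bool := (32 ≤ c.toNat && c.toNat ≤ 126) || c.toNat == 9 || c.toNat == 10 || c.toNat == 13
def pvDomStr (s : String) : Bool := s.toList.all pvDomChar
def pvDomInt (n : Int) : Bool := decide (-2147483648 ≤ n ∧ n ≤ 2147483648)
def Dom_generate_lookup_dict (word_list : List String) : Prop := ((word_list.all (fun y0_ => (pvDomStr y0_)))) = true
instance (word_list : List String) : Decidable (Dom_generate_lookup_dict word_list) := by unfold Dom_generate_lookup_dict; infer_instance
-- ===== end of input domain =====

-- B replaces A's inline per-word list-membership dedup by a build-then-dedup two-pass structure (dict.fromkeys once per bucket; measured faster in a timing run).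

-- ===== PORT A =====
-- loop body of A (one iteration of `for word in word_list`)
def pvStepA (lookup_dict : PySem.Dict String (PySem.Dict String (List String))) (word : String) :
    PySem.Dict String (PySem.Dict String (List String)) :=
  if word = "" then lookup_dict  -- `if not word: continue`
  else
    let first_letter := match PySem.Str.pyGet? word 0 with  -- word[0] (a 1-char string)
      | some c => String.ofList [c]
      | none => ""
    let word_len := PySem.Int.toStr (PySem.Str.len word)
    let d1 := if lookup_dict.contains first_letter = false
              then lookup_dict.insert first_letter PySem.Dict.empty
              else lookup_dict
    let inner := d1.getD first_letter PySem.Dict.empty  -- lookup_dict[first_letter] (present by construction)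
    if inner.contains word_len = false then
      d1.insert first_letter (inner.insert word_len [word])
    else
      let lst := inner.getD word_len []
      if word ∈ lst then d1
      else d1.insert first_letter (inner.insert word_len (lst ++ [word]))

def generate_lookup_dict (word_list : List String) : List (String × List (String × List String)) :=
  ((word_list.foldl pvStepA PySem.Dict.empty).items.map (fun p => (p.1, p.2.items)))

-- ===== PORT B =====
-- loop body of B's first pass (setdefault/append; modify d k dflt f = d[k] = f(d.get(k, dflt)))
def pvStepB (lookup_dict : PySem.Dict String (PySem.Dict String (List String))) (word : String) :
    PySem.Dict String (PySem.Dict String (List String)) :=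
  if word = "" then lookup_dict
  else
    let first_letter := match PySem.Str.pyGet? word 0 with
      | some c => String.ofList [c]
      | none => ""
    let word_len := PySem.Int.toStr (PySem.Str.len word)
    lookup_dict.modify first_letter PySem.Dict.empty
      (fun inner => inner.modify word_len [] (fun lst => lst ++ [word]))

-- the inner dict comprehension: {length: list(dict.fromkeys(words)) for length, words in inner.items()}
def pvDedupInner (inner : PySem.Dict String (List String)) : PySem.Dict String (List String) :=
  PySem.Dict.mk (inner.items.map (fun q => (q.1, PySem.List.dedup q.2)))

def generate_lookup_dict_alt (word_list : List String) : List (String × List (String × List String)) :=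
  let d := word_list.foldl pvStepB PySem.Dict.empty
  d.items.map (fun p => (p.1, (pvDedupInner p.2).items))

-- ===== PRECONDITION & SPEC =====
def Spec_generate_lookup_dict (word_list : List String) (out : List (String × List (String × List String))) : Prop := out = generate_lookup_dict_alt word_list
instance (word_list : List String) (out : List (String × List (String × List String))) : Decidable (Spec_generate_lookup_dict word_list out) := by unfold Spec_generate_lookup_dict; infer_instance

-- ===== CLAIM (what is proved, stated in full; the proofs are below) =====
def Claim_equal_generate_lookup_dict : Prop := ∀ (word_list : List String), Dom_generate_lookup_dict word_list → Spec_generate_lookup_dict word_list (generate_lookup_dict word_list)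

-- ===== LEMMAS AND PROOFS =====

-- dedupMap : the whole-table dedup B applies at the end
def pvDedupMap (d : PySem.Dict String (PySem.Dict String (List String))) :
    PySem.Dict String (PySem.Dict String (List String)) :=
  PySem.Dict.mk (d.items.map (fun p => (p.1, pvDedupInner p.2)))

-- invariant on B's running state: outer keys and every inner dict's keys are nodup
def pvInv (d : PySem.Dict String (PySem.Dict String (List String))) : Prop :=
  d.keys.Nodup ∧ ∀ p ∈ d.items, (Prod.snd p).keys.Nodup

theorem pv_contains_dedupInner (i : PySem.Dict String (List String)) (k : String) :
    (pvDedupInner i).contains k = i.contains k := by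
  simp [pvDedupInner, PySem.Dict.contains, List.any_map, Function.comp_def]

theorem pv_contains_dedupMap (d : PySem.Dict String (PySem.Dict String (List String))) (k : String) :
    (pvDedupMap d).contains k = d.contains k := by
  simp [pvDedupMap, PySem.Dict.contains, List.any_map, Function.comp_def]

theorem pv_keys_dedupInner (i : PySem.Dict String (List String)) :
    (pvDedupInner i).keys = i.keys := by
  simp [pvDedupInner, PySem.Dict.keys, List.map_map, Function.comp]

theorem pv_keys_dedupMap (d : PySem.Dict String (PySem.Dict String (List String))) :
    (pvDedupMap d).keys = d.keys := by
  simp [pvDedupMap, PySem.Dict.keys, List.map_map, Function.comp]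

theorem pv_get?_dedupInner (i : PySem.Dict String (List String)) (k : String) :
    (pvDedupInner i).get? k = (i.get? k).map PySem.List.dedup := by
  simp only [PySem.Dict.get?, pvDedupInner]
  rw [List.find?_map]
  have hp : ((fun p : String × List String => p.1 == k) ∘
      (fun q : String × List String => (q.1, PySem.List.dedup q.2))) =
      (fun p : String × List String => p.1 == k) := by funext q; rfl
  rw [hp]
  cases List.find? (fun p => p.1 == k) i.items <;> rfl

theorem pv_get?_dedupMap (d : PySem.Dict String (PySem.Dict String (List String))) (k : String) :
    (pvDedupMap d).get? k = (d.get? k).map pvDedupInner := by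
  simp only [PySem.Dict.get?, pvDedupMap]
  rw [List.find?_map]
  have hp : ((fun p : String × PySem.Dict String (List String) => p.1 == k) ∘
      (fun q : String × PySem.Dict String (List String) => (q.1, pvDedupInner q.2))) =
      (fun p : String × PySem.Dict String (List String) => p.1 == k) := by funext q; rfl
  rw [hp]
  cases List.find? (fun p => p.1 == k) d.items <;> rfl

theorem pv_dedupInner_insert (i : PySem.Dict String (List String)) (k : String) (lst : List String) :
    pvDedupInner (i.insert k lst) = (pvDedupInner i).insert k (PySem.List.dedup lst) := by
  apply PySem.Dict.ext
  have hlhs : (pvDedupInner (i.insert k lst)).items =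
      (i.insert k lst).items.map (fun q => (q.1, PySem.List.dedup q.2)) := rfl
  have hit : (pvDedupInner i).items = i.items.map (fun q => (q.1, PySem.List.dedup q.2)) := rfl
  rw [hlhs, PySem.Dict.items_insert, PySem.Dict.items_insert, pv_contains_dedupInner, hit]
  by_cases h : i.contains k = true
  · simp only [h, if_true, List.map_map]
    apply List.map_congr_left
    intro p _
    by_cases hk : p.1 = k <;> simp [hk]
  · simp [h]

theorem pv_dedupMap_insert (d : PySem.Dict String (PySem.Dict String (List String))) (k : String)
    (v : PySem.Dict String (List String)) :
    pvDedupMap (d.insert k v) = (pvDedupMap d).insert k (pvDedupInner v) := by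
  apply PySem.Dict.ext
  have hlhs : (pvDedupMap (d.insert k v)).items =
      (d.insert k v).items.map (fun q => (q.1, pvDedupInner q.2)) := rfl
  have hit : (pvDedupMap d).items = d.items.map (fun q => (q.1, pvDedupInner q.2)) := rfl
  rw [hlhs, PySem.Dict.items_insert, PySem.Dict.items_insert, pv_contains_dedupMap, hit]
  by_cases h : d.contains k = true
  · simp only [h, if_true, List.map_map]
    apply List.map_congr_left
    intro p _
    by_cases hk : p.1 = k <;> simp [hk]
  · simp [h]

theorem pv_dedup_append_singleton (lst : List String) (w : String) :
    PySem.List.dedup (lst ++ [w]) =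
      if w ∈ PySem.List.dedup lst then PySem.List.dedup lst else PySem.List.dedup lst ++ [w] := by
  simp only [PySem.List.dedup, PySem.Set.ofList_append]
  show PySem.Set.add (PySem.Set.ofList lst) w = _
  simp only [PySem.Set.add]
  by_cases h : w ∈ PySem.Set.ofList lst <;> simp [h]

-- inserting the value a key already maps to changes nothing
theorem pv_insert_self_of_get? {ν : Type} (d : PySem.Dict String ν) (k : String) (v : ν)
    (hnd : d.keys.Nodup) (hget : d.get? k = some v) : d.insert k v = d := by
  have hc : d.contains k = true := by
    rw [PySem.Dict.contains_eq_isSome_get?, hget]; rfl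
  apply PySem.Dict.ext
  rw [PySem.Dict.items_insert_of_contains d v hc]
  have : ∀ p ∈ d.items, (if p.1 == k then (k, v) else p) = p := by
    intro p hp
    by_cases hk : p.1 = k
    · subst hk
      have := PySem.Dict.get?_of_mem_items d (k := p.1) (v := p.2) hp hnd
      rw [hget] at this
      simp [Option.some.injEq] at this
      simp [this]
    · simp [hk]
  calc List.map (fun p => if p.1 == k then (k, v) else p) d.items
      = List.map id d.items := List.map_congr_left this
    _ = d.items := List.map_id d.items

theorem pv_step_comm (d : PySem.Dict String (PySem.Dict String (List String))) (w : String)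
    (hinv : pvInv d) : pvStepA (pvDedupMap d) w = pvDedupMap (pvStepB d w) := by
  by_cases hw : w = ""
  · simp [pvStepA, pvStepB, hw]
  · unfold pvStepA pvStepB
    simp only [hw, if_false]
    set fl := (match PySem.Str.pyGet? w 0 with | some c => String.ofList [c] | none => "") with hfl
    set wl := PySem.Int.toStr (PySem.Str.len w) with hwl
    simp only [PySem.Dict.modify]
    by_cases h1 : d.contains fl = true
    · -- outer key already present
      obtain ⟨i0, hi0⟩ : ∃ i0, d.get? fl = some i0 := by
        rw [PySem.Dict.contains_eq_isSome_get?] at h1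
        exact Option.isSome_iff_exists.mp h1
      have hi0mem : (fl, i0) ∈ d.items := PySem.Dict.mem_items_of_get?_eq_some d hi0
      have hi0nd : i0.keys.Nodup := hinv.2 _ hi0mem
      have hDc : (pvDedupMap d).contains fl = true := by rw [pv_contains_dedupMap]; exact h1
      have hgD : (pvDedupMap d).getD fl PySem.Dict.empty = pvDedupInner i0 := by
        simp [PySem.Dict.getD, pv_get?_dedupMap, hi0]
      have hgB : d.getD fl PySem.Dict.empty = i0 := by simp [PySem.Dict.getD, hi0]
      simp only [hDc, hgB, Bool.true_eq_false, if_false, hgD]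
      by_cases h2 : i0.contains wl = true
      · obtain ⟨l0, hl0⟩ : ∃ l0, i0.get? wl = some l0 := by
          rw [PySem.Dict.contains_eq_isSome_get?] at h2
          exact Option.isSome_iff_exists.mp h2
        have hic : (pvDedupInner i0).contains wl = true := by rw [pv_contains_dedupInner]; exact h2
        have hgi : (pvDedupInner i0).getD wl [] = PySem.List.dedup l0 := by
          simp [PySem.Dict.getD, pv_get?_dedupInner, hl0]
        have hgl : i0.getD wl [] = l0 := by simp [PySem.Dict.getD, hl0]
        simp only [hic, hgl, Bool.true_eq_false, if_false, hgi]
        rw [pv_dedupMap_insert, pv_dedupInner_insert, pv_dedup_append_singleton]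
        by_cases h3 : w ∈ PySem.List.dedup l0
        · simp only [h3, if_true]
          rw [pv_insert_self_of_get? (pvDedupInner i0) wl (PySem.List.dedup l0)
                (by rw [pv_keys_dedupInner]; exact hi0nd)
                (by rw [pv_get?_dedupInner, hl0]; rfl)]
          rw [pv_insert_self_of_get? (pvDedupMap d) fl (pvDedupInner i0)
                (by rw [pv_keys_dedupMap]; exact hinv.1)
                (by rw [pv_get?_dedupMap, hi0]; rfl)]
        · simp only [h3, if_false]
      · have hic : (pvDedupInner i0).contains wl = false := by
          rw [pv_contains_dedupInner]; simpa using h2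
        have hgl : i0.getD wl [] = [] := PySem.Dict.getD_of_not_contains i0 [] (by simpa using h2)
        simp only [hic, hgl, List.nil_append, if_pos]
        rw [pv_dedupMap_insert, pv_dedupInner_insert]
        rfl
    · -- fresh outer key
      have h1' : d.contains fl = false := by simpa using h1
      have hDc : (pvDedupMap d).contains fl = false := by rw [pv_contains_dedupMap]; exact h1'
      have hgB : d.getD fl PySem.Dict.empty = PySem.Dict.empty :=
        PySem.Dict.getD_of_not_contains d PySem.Dict.empty h1'
      have hgA : ((pvDedupMap d).insert fl PySem.Dict.empty).getD fl PySem.Dict.empty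
          = PySem.Dict.empty := by
        simp [PySem.Dict.getD, PySem.Dict.get?_insert_self]
      simp only [hDc, if_pos, hgB, hgA]
      have hec : (PySem.Dict.empty : PySem.Dict String (List String)).contains wl = false := rfl
      have heg : (PySem.Dict.empty : PySem.Dict String (List String)).getD wl [] = [] := rfl
      simp only [hec, heg, List.nil_append, if_pos]
      rw [PySem.Dict.insert_insert_self, pv_dedupMap_insert, pv_dedupInner_insert]
      rfl

theorem pv_inv_step (d : PySem.Dict String (PySem.Dict String (List String))) (w : String)
    (hinv : pvInv d) : pvInv (pvStepB d w) := by
  unfold pvStepB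
  by_cases hw : w = ""
  · simpa [hw]
  · simp only [hw, if_false, PySem.Dict.modify]
    set fl := (match PySem.Str.pyGet? w 0 with | some c => String.ofList [c] | none => "") with hfl
    set wl := PySem.Int.toStr (PySem.Str.len w) with hwl
    set i0 := d.getD fl PySem.Dict.empty with hi0
    have hi0nd : i0.keys.Nodup := by
      show (d.getD fl PySem.Dict.empty).keys.Nodup
      rw [PySem.Dict.getD_eq_get?_getD]
      cases hg : d.get? fl with
      | none => simp [PySem.Dict.keys, PySem.Dict.empty]
      | some i =>
        simp only [Option.getD_some]
        exact hinv.2 _ (PySem.Dict.mem_items_of_get?_eq_some d hg)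
    constructor
    · exact PySem.Dict.nodup_keys_insert _ _ _ hinv.1
    · intro p hp
      rcases (PySem.Dict.mem_items_insert _ _ _ _).mp hp with h | h
      · subst h
        exact PySem.Dict.nodup_keys_insert _ _ _ hi0nd
      · exact hinv.2 _ h.1

theorem pv_fold_comm (l : List String) (d : PySem.Dict String (PySem.Dict String (List String)))
    (hinv : pvInv d) : List.foldl pvStepA (pvDedupMap d) l = pvDedupMap (List.foldl pvStepB d l) := by
  induction l generalizing d with
  | nil => rfl
  | cons w l ih =>
    simp only [List.foldl_cons]
    rw [pv_step_comm d w hinv]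
    exact ih _ (pv_inv_step d w hinv)

-- ===== VERDICT (by name: the statement is the Claim_ definition above) =====
theorem generate_lookup_dict_spec : Claim_equal_generate_lookup_dict := by
  intro word_list _
  unfold Spec_generate_lookup_dict generate_lookup_dict generate_lookup_dict_alt
  have h0 : pvInv PySem.Dict.empty := by
    constructor
    · simp [PySem.Dict.keys, PySem.Dict.empty]
    · intro p hp; simp [PySem.Dict.empty] at hp
  have he : (pvDedupMap PySem.Dict.empty) = PySem.Dict.empty := rfl
  have := pv_fold_comm word_list PySem.Dict.empty h0
  rw [he] at this
  rw [this]
  simp [pvDedupMap, List.map_map, Function.comp]
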